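-- pv_equiv track=rewrite | github.com/plahteenlahti/tiras20 | substrings.py | count
-- ===== SOURCE A (Python) =====
-- def count(s):
-- 	substrings = []
-- 	substrings.append(s)
--
-- 	for i in range(len(s)):
-- 		for j in range(len(s)+1):
-- 				sub = s[i:j]
-- 				if(sub != ''):
-- 					substrings.append(sub)
-- 	return len(list(set(substrings)))
-- ===== SOURCE B (Python) =====
-- def count(s):
--     seen = set()
--     for i in range(len(s)):
--         sub = ""
--         for ch in s[i:]:
--             sub += ch
--             seen.add(sub)
--     return len(seen)
-- ===== Notes on version B (the rewrite author's own statement) =====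
-- stated objective: alternative
-- what changed: B drops A's duplicate-heavy list-then-set pass (which seeds the list with s itself and enumerates all n*(n+1) index pairs including empty slices): it adds each nonempty substring to a set directly, building substrings incrementally character by character from each start position, enumerating each of the n(n+1)/2 substrings exactly once.
-- intended difference: On the empty string A returns 1 (it unconditionally appends s itself to the list before deduplicating, so '' is counted), while B returns 0, the intended number of distinct non-empty substrings of ''. — e.g. on count(""): A returns 1, B returns 0
import Mathlib
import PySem

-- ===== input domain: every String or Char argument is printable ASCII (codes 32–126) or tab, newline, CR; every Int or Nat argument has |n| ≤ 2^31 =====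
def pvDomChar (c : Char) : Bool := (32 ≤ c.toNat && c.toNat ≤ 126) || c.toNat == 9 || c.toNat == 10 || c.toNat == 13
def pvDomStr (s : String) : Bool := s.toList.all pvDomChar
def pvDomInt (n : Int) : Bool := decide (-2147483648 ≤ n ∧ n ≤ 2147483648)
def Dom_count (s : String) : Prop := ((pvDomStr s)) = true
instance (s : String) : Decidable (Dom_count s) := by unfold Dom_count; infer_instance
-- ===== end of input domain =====

-- B enumerates each nonempty substring exactly once, building it incrementally into a set,
-- instead of A's list of all n*(n+1) slices (plus s itself) deduplicated at the end;
-- on the empty string A returns 1 and B returns the intended 0 (see D_count).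


-- ===== PORT A =====
-- substrings = [s]; for i in range(len(s)): for j in range(len(s)+1): sub = s[i:j]; if sub != '': append
-- return len(list(set(substrings)))   (strings handled as List Char via PySem)
def count (s : String) : Int :=
  let cs := s.toList
  let substrings : List (List Char) :=
    (PySem.List.pyRange 0 (cs.length : Int) 1).foldl (fun subs i =>
      (PySem.List.pyRange 0 ((cs.length : Int) + 1) 1).foldl (fun subs j =>
        if PySem.List.slice cs (some i) (some j) ≠ ([] : List Char) then
          subs ++ [PySem.List.slice cs (some i) (some j)]
        else subs) subs) [cs]
  ((PySem.Set.ofList substrings).length : Int)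

-- ===== PORT B =====
-- seen = set(); for i in range(len(s)): sub = ''; for ch in s[i:]: sub += ch; seen.add(sub); return len(seen)
def count_alt (s : String) : Int :=
  let cs := s.toList
  let seen : PySem.Set (List Char) :=
    (List.range cs.length).foldl (fun seen i =>
      ((cs.drop i).foldl
        (fun (p : List Char × PySem.Set (List Char)) ch =>
          (p.1 ++ [ch], PySem.Set.add p.2 (p.1 ++ [ch]))) ([], seen)).2) PySem.Set.empty
  ((seen.length : Int))

-- ===== PRECONDITION & SPEC =====
-- On the empty string A returns 1 (it unconditionally appends s itself before deduplicating,
-- so '' is counted), while B returns 0, the intended number of distinct non-empty substrings of ''.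
def D_count (s : String) : Prop := s = ""
instance (s : String) : Decidable (D_count s) := by unfold D_count; infer_instance
def Spec_count (s : String) (out : Int) : Prop := ¬ D_count s → out = count_alt s
instance (s : String) (out : Int) : Decidable (Spec_count s out) := by unfold Spec_count; infer_instance
def pvDiffWitness_count : String := ""
def pvDiffWitnessOut_count : Int × Int := (1, 0)

-- ===== CLAIM (what is proved, stated in full; the proofs are below) =====
def Claim_unchanged_count : Prop := ∀ (s : String), Dom_count s → Spec_count s (count s)
def Claim_changed_count : Prop := Dom_count (pvDiffWitness_count) ∧ D_count (pvDiffWitness_count) ∧ count (pvDiffWitness_count) = pvDiffWitnessOut_count.1 ∧ count_alt (pvDiffWitness_count) = pvDiffWitnessOut_count.2 ∧ pvDiffWitnessOut_count.1 ≠ pvDiffWitnessOut_count.2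
def Claim_exact_count : Prop := ∀ (s : String), Dom_count s → D_count s → count s ≠ count_alt s

-- ===== LEMMAS AND PROOFS =====

-- membership in B's inner loop: the prefixes pref ++ l.take (k+1) get added
lemma mem_inner (l pref : List Char) (seen : PySem.Set (List Char)) (x : List Char) :
    x ∈ (l.foldl
        (fun (p : List Char × PySem.Set (List Char)) ch =>
          (p.1 ++ [ch], PySem.Set.add p.2 (p.1 ++ [ch]))) (pref, seen)).2 ↔
      x ∈ seen ∨ ∃ k < l.length, x = pref ++ l.take (k + 1) := by
  induction l generalizing pref seen with
  | nil => simp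
  | cons c t ih =>
    simp only [List.foldl_cons, ih, PySem.Set.mem_add, List.length_cons]
    constructor
    · rintro ((h | rfl) | ⟨k, hk, rfl⟩)
      · exact Or.inl h
      · exact Or.inr ⟨0, by omega, by simp⟩
      · exact Or.inr ⟨k + 1, by omega, by simp [List.take_succ_cons]⟩
    · rintro (h | ⟨k, hk, rfl⟩)
      · exact Or.inl (Or.inl h)
      · cases k with
        | zero => exact Or.inl (Or.inr (by simp))
        | succ k => exact Or.inr ⟨k, by omega, by simp [List.take_succ_cons]⟩

lemma nodup_inner (l pref : List Char) (seen : PySem.Set (List Char)) (h : seen.Nodup) :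
    ((l.foldl
        (fun (p : List Char × PySem.Set (List Char)) ch =>
          (p.1 ++ [ch], PySem.Set.add p.2 (p.1 ++ [ch]))) (pref, seen)).2).Nodup := by
  induction l generalizing pref seen with
  | nil => exact h
  | cons c t ih => exact ih _ _ (PySem.Set.nodup_add _ _ h)

-- membership in B's outer loop
lemma mem_outer (cs : List Char) (l : List Nat) (seen : PySem.Set (List Char)) (x : List Char) :
    x ∈ l.foldl (fun seen i =>
        ((cs.drop i).foldl
          (fun (p : List Char × PySem.Set (List Char)) ch =>
            (p.1 ++ [ch], PySem.Set.add p.2 (p.1 ++ [ch]))) ([], seen)).2) seen ↔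
      x ∈ seen ∨ ∃ i ∈ l, ∃ k < (cs.drop i).length, x = (cs.drop i).take (k + 1) := by
  induction l generalizing seen with
  | nil => simp
  | cons a t ih =>
    simp only [List.foldl_cons, ih, mem_inner, List.nil_append, List.mem_cons]
    constructor
    · rintro ((h | ⟨k, hk, rfl⟩) | ⟨i, hi, hk⟩)
      · exact Or.inl h
      · exact Or.inr ⟨a, Or.inl rfl, k, hk, rfl⟩
      · exact Or.inr ⟨i, Or.inr hi, hk⟩
    · rintro (h | ⟨i, (rfl | hi), hk⟩)
      · exact Or.inl (Or.inl h)
      · exact Or.inl (Or.inr hk)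
      · exact Or.inr ⟨i, hi, hk⟩

lemma nodup_outer (cs : List Char) (l : List Nat) (seen : PySem.Set (List Char)) (h : seen.Nodup) :
    (l.foldl (fun seen i =>
        ((cs.drop i).foldl
          (fun (p : List Char × PySem.Set (List Char)) ch =>
            (p.1 ++ [ch], PySem.Set.add p.2 (p.1 ++ [ch]))) ([], seen)).2) seen).Nodup := by
  induction l generalizing seen with
  | nil => exact h
  | cons a t ih => exact ih _ (nodup_inner _ _ _ h)

-- A's list, flattened: [cs] then every nonempty slice in loop order
lemma substringsA_eq (cs : List Char) :
    (PySem.List.pyRange 0 (cs.length : Int) 1).foldl (fun subs i =>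
      (PySem.List.pyRange 0 ((cs.length : Int) + 1) 1).foldl (fun subs j =>
        if PySem.List.slice cs (some i) (some j) ≠ ([] : List Char) then
          subs ++ [PySem.List.slice cs (some i) (some j)]
        else subs) subs) [cs]
    = [cs] ++ (PySem.List.pyRange 0 (cs.length : Int) 1).flatMap (fun i =>
        ((PySem.List.pyRange 0 ((cs.length : Int) + 1) 1).filter
          (fun j => !(PySem.List.slice cs (some i) (some j)).isEmpty)).map
          (fun j => PySem.List.slice cs (some i) (some j))) := by
  have hinner : ∀ (i : Int) (acc : List (List Char)),
      (PySem.List.pyRange 0 ((cs.length : Int) + 1) 1).foldl (fun subs j =>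
        if PySem.List.slice cs (some i) (some j) ≠ ([] : List Char) then
          subs ++ [PySem.List.slice cs (some i) (some j)]
        else subs) acc
      = acc ++ ((PySem.List.pyRange 0 ((cs.length : Int) + 1) 1).filter
          (fun j => !(PySem.List.slice cs (some i) (some j)).isEmpty)).map
          (fun j => PySem.List.slice cs (some i) (some j)) := by
    intro i acc
    rw [← PySem.List.foldl_append_if (fun j => !(PySem.List.slice cs (some i) (some j)).isEmpty)
      (fun j => PySem.List.slice cs (some i) (some j))]
    apply PySem.List.foldl_congr_mem
    intro b a _
    by_cases h : PySem.List.slice cs (some i) (some a) = ([] : List Char) <;>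
      simp [h]
  calc _ = (PySem.List.pyRange 0 (cs.length : Int) 1).foldl (fun subs i => subs ++
        ((PySem.List.pyRange 0 ((cs.length : Int) + 1) 1).filter
          (fun j => !(PySem.List.slice cs (some i) (some j)).isEmpty)).map
          (fun j => PySem.List.slice cs (some i) (some j))) [cs] := by
        apply PySem.List.foldl_congr_mem
        intro b a _; exact hinner a b
    _ = _ := PySem.List.foldl_append_eq_flatMap _ _ _

-- substring characterisations agree on nonempty cs
lemma mem_iff_mem (cs : List Char) (hcs : cs ≠ []) (x : List Char) :
    (x = cs ∨ ∃ i, (0 ≤ i ∧ i < (cs.length : Int)) ∧ ∃ j, (0 ≤ j ∧ j < (cs.length : Int) + 1) ∧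
        ¬(PySem.List.slice cs (some i) (some j)).isEmpty ∧ x = PySem.List.slice cs (some i) (some j)) ↔
      ∃ i < cs.length, ∃ k < (cs.drop i).length, x = (cs.drop i).take (k + 1) := by
  constructor
  · rintro (rfl | ⟨i, ⟨hi0, hin⟩, j, ⟨hj0, hjn⟩, hne, rfl⟩)
    · have hlen : 0 < x.length := List.length_pos_iff.mpr hcs
      refine ⟨0, hlen, x.length - 1, ?_, ?_⟩
      · rw [List.drop_zero]; omega
      · rw [List.drop_zero]
        have h1 : x.length - 1 + 1 = x.length := by omega
        rw [h1, List.take_length]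
    · rw [PySem.List.slice_toNat cs hi0 hj0] at hne ⊢
      have hne' : ((cs.drop i.toNat).take (j.toNat - i.toNat)).length ≠ 0 := by
        intro h; rw [List.isEmpty_iff, ← List.length_eq_zero_iff] at hne; exact hne h
      rw [List.length_take, List.length_drop] at hne'
      have hIn : i.toNat < cs.length := by omega
      have hJn : j.toNat ≤ cs.length := by omega
      refine ⟨i.toNat, hIn, j.toNat - i.toNat - 1, ?_, ?_⟩
      · rw [List.length_drop]; omega
      · have : j.toNat - i.toNat - 1 + 1 = j.toNat - i.toNat := by omega
        rw [this]
  · rintro ⟨i, hi, k, hk, rfl⟩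
    rw [List.length_drop] at hk
    refine Or.inr ⟨(i : Int), ⟨by omega, by exact_mod_cast hi⟩, ((i + k + 1 : Nat) : Int),
      ⟨by omega, by exact_mod_cast (by omega : i + k + 1 < cs.length + 1)⟩, ?_, ?_⟩
    · rw [PySem.List.slice_toNat cs (by omega) (by omega)]
      simp only [Int.toNat_natCast]
      have h1 : i + k + 1 - i = k + 1 := by omega
      rw [h1, List.isEmpty_iff, ← List.length_eq_zero_iff, List.length_take, List.length_drop]
      omega
    · rw [PySem.List.slice_toNat cs (by omega) (by omega)]
      simp only [Int.toNat_natCast]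
      have h1 : i + k + 1 - i = k + 1 := by omega
      rw [h1]

-- ===== VERDICT (by name: the statement is the Claim_ definition above) =====
theorem count_spec : Claim_unchanged_count := by
  intro s _ hD'
  have hcs : s.toList ≠ [] := fun h => hD' (String.toList_eq_nil_iff.mp h)
  unfold count count_alt
  simp only []
  have hnodA := PySem.Set.nodup_ofList (α := List Char)
  have hnodB := nodup_outer s.toList (List.range s.toList.length) PySem.Set.empty (by simp [PySem.Set.empty])
  congr 1
  apply List.Perm.length_eq
  rw [List.perm_ext_iff_of_nodup (hnodA _) hnodB]
  intro x
  rw [PySem.Set.mem_ofList, substringsA_eq, mem_outer]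
  simp only [List.mem_append, List.mem_singleton, List.mem_flatMap, List.mem_map,
    List.mem_filter, PySem.List.mem_pyRange_one, List.mem_range, PySem.Set.empty,
    List.not_mem_nil, false_or]
  have := mem_iff_mem s.toList hcs x
  constructor
  · rintro (rfl | ⟨i, hi, j, ⟨hj, hne⟩, rfl⟩)
    · exact (this.mp (Or.inl rfl))
    · exact this.mp (Or.inr ⟨i, hi, j, hj, by simpa using hne, rfl⟩)
  · intro h
    rcases this.mpr h with (rfl | ⟨i, hi, j, hj, hne, rfl⟩)
    · exact Or.inl rfl
    · exact Or.inr ⟨i, hi, j, ⟨hj, by simpa using hne⟩, rfl⟩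

theorem count_changed : Claim_changed_count := by unfold Claim_changed_count; decide

theorem count_tight : Claim_exact_count := by
  intro s _ hD
  unfold D_count at hD
  subst hD
  decide
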